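-- pv_equiv track=rewrite | github.com/astrobleem/SNES-CliffHangerArcade | tools/lua_scene_exporter.py | build_scene_order
-- ===== SOURCE A (Python) =====
-- from typing import Any, Dict, List, Optional, Tuple, Union
--
-- def build_scene_order(rows: List[List[str]]) -> Dict[str, str]:
--     """Build deterministic scene progression from rows.
--
--     Iterates rows top-to-bottom, columns left-to-right, skipping duplicates.
--     Returns dict mapping scene_name -> next_scene_name.
--     Introduction is always first; the_dragons_lair exit -> title_screen.
--     """
--     # Flatten rows left-to-right, row-by-row, skipping duplicates
--     linear: List[str] = []
--     seen: set = set()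
--     seen.add('vestibule')  # exclude vestibule — it's special-cased below
--     for row in rows:
--         if not isinstance(row, list):
--             continue
--         for scene in row:
--             if scene not in seen:
--                 linear.append(scene)
--                 seen.add(scene)
--
--     # Build next-scene mapping
--     order: Dict[str, str] = {}
--
--     # Introduction -> vestibule (always the first gameplay scene)
--     order['introduction'] = 'vestibule'
--
--     # Each scene -> next scene in linear order
--     for i in range(len(linear) - 1):
--         order[linear[i]] = linear[i + 1]
--
--     # Vestibule -> first real gameplay scene
--     if linear:
--         order['vestibule'] = linear[0]
--
--     # Last scene (the_dragons_lair) -> score_entry (endgame victory)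
--     if linear:
--         order[linear[-1]] = 'score_entry'
--
--     # attract_mode -> title_screen
--     order['attract_mode'] = 'title_screen'
--
--     return order
-- ===== SOURCE B (Python) =====
-- def build_scene_order(rows):
--     """One fused pass: link scenes while deduplicating, instead of building a
--     linear list first and indexing over it afterwards."""
--     order = {'introduction': 'vestibule'}
--     seen = {'vestibule'}
--     first = None
--     prev = None
--     for row in rows:
--         if not isinstance(row, list):
--             continue
--         for scene in row:
--             if scene in seen:
--                 continue
--             seen.add(scene)
--             if prev is None:
--                 first = scene
--             else:
--                 order[prev] = scene
--             prev = scene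
--     if prev is not None:
--         order['vestibule'] = first
--         order[prev] = 'score_entry'
--     order['attract_mode'] = 'title_screen'
--     return order
-- ===== Notes on version B (the rewrite author's own statement) =====
-- stated objective: alternative
-- what changed: Fused A's two passes into one: instead of building a deduplicated linear list and then indexing over it, a single dedup pass maintains prev/first markers and emits each next-scene link as soon as a scene is accepted.
import Mathlib
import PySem

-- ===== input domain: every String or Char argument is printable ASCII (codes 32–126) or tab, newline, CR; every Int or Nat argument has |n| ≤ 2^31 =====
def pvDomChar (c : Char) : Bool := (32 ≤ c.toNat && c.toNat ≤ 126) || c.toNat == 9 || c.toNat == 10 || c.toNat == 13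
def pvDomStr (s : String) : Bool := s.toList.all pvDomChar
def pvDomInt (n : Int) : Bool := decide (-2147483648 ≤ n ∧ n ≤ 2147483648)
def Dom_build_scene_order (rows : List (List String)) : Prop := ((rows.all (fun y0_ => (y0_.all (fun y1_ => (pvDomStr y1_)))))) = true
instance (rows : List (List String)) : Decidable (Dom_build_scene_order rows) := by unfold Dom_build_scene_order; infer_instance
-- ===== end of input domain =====

-- B fuses A's two passes (flatten-dedup list, then index-link) into ONE pass keeping prev/first markers; same result, same cost (objective: alternative).

-- ===== PORT A =====
-- 'isinstance(row, list)' is always true under the type List (List String), so the 'continue' branch never fires.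
def build_scene_order (rows : List (List String)) : List (String × String) :=
  let st := rows.foldl (fun st row =>
      row.foldl (fun st scene =>
        if PySem.Set.contains st.2 scene then st
        else (st.1 ++ [scene], PySem.Set.add st.2 scene)) st)
    (([] : List String), PySem.Set.add PySem.Set.empty "vestibule")
  let linear := st.1
  let order : PySem.Dict String String := PySem.Dict.empty
  let order := order.insert "introduction" "vestibule"
  let order := (PySem.List.pyRange 0 ((linear.length : Int) - 1) 1).foldl
      (fun d i => d.insert (PySem.List.pyGetD linear i "") (PySem.List.pyGetD linear (i + 1) "")) order
  let order := if linear = [] then order else order.insert "vestibule" (PySem.List.pyGetD linear 0 "")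
  let order := if linear = [] then order else order.insert (PySem.List.pyGetD linear (-1) "") "score_entry"
  let order := order.insert "attract_mode" "title_screen"
  order.items

-- ===== PORT B =====
-- state = (order, first, prev, seen); 'first.getD ""' is Python's 'first' which is a string whenever prev is set.
def build_scene_order_alt (rows : List (List String)) : List (String × String) :=
  let st := rows.foldl (fun st row =>
      row.foldl (fun st scene =>
        if PySem.Set.contains st.2.2.2 scene then st
        else
          ((match st.2.2.1 with
            | none => st.1
            | some p => st.1.insert p scene),
           (match st.2.2.1 with
            | none => some scene
            | some _ => st.2.1),
           some scene,
           PySem.Set.add st.2.2.2 scene)) st)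
    ((PySem.Dict.empty.insert "introduction" "vestibule" : PySem.Dict String String),
     (none : Option String), (none : Option String),
     PySem.Set.add PySem.Set.empty "vestibule")
  let order := st.1
  let order := match st.2.2.1 with
    | none => order
    | some p => (order.insert "vestibule" (st.2.1.getD "")).insert p "score_entry"
  (order.insert "attract_mode" "title_screen").items

-- ===== PRECONDITION & SPEC =====
def Spec_build_scene_order (rows : List (List String)) (out : List (String × String)) : Prop := out = build_scene_order_alt rows
instance (rows : List (List String)) (out : List (String × String)) : Decidable (Spec_build_scene_order rows out) := by unfold Spec_build_scene_order; infer_instance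

-- ===== CLAIM (what is proved, stated in full; the proofs are below) =====
def Claim_equal_build_scene_order : Prop := ∀ (rows : List (List String)), Dom_build_scene_order rows → Spec_build_scene_order rows (build_scene_order rows)

-- ===== LEMMAS AND PROOFS =====

-- the pairwise-link fold of A, written structurally
def pvLinks (d : PySem.Dict String String) : List String → PySem.Dict String String
  | [] => d
  | [_] => d
  | a :: b :: t => pvLinks (d.insert a b) (b :: t)

-- A's loop body (flatten with dedup) and B's loop body, named for the simulation lemma
def pvStepA (st : List String × PySem.Set String) (scene : String) : List String × PySem.Set String :=
  if PySem.Set.contains st.2 scene then st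
  else (st.1 ++ [scene], PySem.Set.add st.2 scene)

def pvStepB (st : PySem.Dict String String × Option String × Option String × PySem.Set String)
    (scene : String) : PySem.Dict String String × Option String × Option String × PySem.Set String :=
  if PySem.Set.contains st.2.2.2 scene then st
  else
    ((match st.2.2.1 with
      | none => st.1
      | some p => st.1.insert p scene),
     (match st.2.2.1 with
      | none => some scene
      | some _ => st.2.1),
     some scene,
     PySem.Set.add st.2.2.2 scene)

theorem pvLinks_concat (lin : List String) (d : PySem.Dict String String) (p s : String)
    (h : lin.getLast? = some p) :
    pvLinks d (lin ++ [s]) = (pvLinks d lin).insert p s := by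
  induction lin generalizing d with
  | nil => simp at h
  | cons a tail ih =>
    cases tail with
    | nil => simp at h; subst h; simp [pvLinks]
    | cons b t =>
      have h' : (b :: t).getLast? = some p := by
        rw [← h]; simp [List.getLast?_cons_cons]
      simpa [pvLinks] using ih (d.insert a b) h'

-- one fused B-step simulates one A-step, lifted to whole folds
theorem pvSim (xs : List String) (lin seen : List String) (d : PySem.Dict String String) :
    xs.foldl pvStepB (pvLinks d lin, lin.head?, lin.getLast?, seen)
      = (pvLinks d (xs.foldl pvStepA (lin, seen)).1,
         (xs.foldl pvStepA (lin, seen)).1.head?,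
         (xs.foldl pvStepA (lin, seen)).1.getLast?,
         (xs.foldl pvStepA (lin, seen)).2) := by
  induction xs generalizing lin seen with
  | nil => simp
  | cons s rest ih =>
    simp only [List.foldl_cons]
    by_cases hc : PySem.Set.contains seen s = true
    · have hA : pvStepA (lin, seen) s = (lin, seen) := by
        simp only [pvStepA]; rw [if_pos hc]
      have hB : pvStepB (pvLinks d lin, lin.head?, lin.getLast?, seen) s
          = (pvLinks d lin, lin.head?, lin.getLast?, seen) := by
        simp only [pvStepB]; rw [if_pos hc]
      rw [hA, hB]; exact ih lin seen
    · have hA : pvStepA (lin, seen) s = (lin ++ [s], PySem.Set.add seen s) := by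
        simp only [pvStepA]; rw [if_neg hc]
      have hB : pvStepB (pvLinks d lin, lin.head?, lin.getLast?, seen) s
          = (pvLinks d (lin ++ [s]), (lin ++ [s]).head?, (lin ++ [s]).getLast?,
             PySem.Set.add seen s) := by
        simp only [pvStepB]; rw [if_neg hc]
        cases hl : lin.getLast? with
        | none =>
          have hnil : lin = [] := List.getLast?_eq_none_iff.mp hl
          subst hnil
          simp [pvLinks]
        | some p =>
          obtain ⟨a, t, rfl⟩ : ∃ a t, lin = a :: t := by
            cases lin with
            | nil => simp at hl
            | cons a t => exact ⟨a, t, rfl⟩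
          rw [pvLinks_concat (a :: t) d p s hl]
          have hgl : (a :: (t ++ [s])).getLast? = some s := by
            rw [← List.cons_append]; exact List.getLast?_concat
          simp [hgl]
      rw [hA, hB]; exact ih (lin ++ [s]) (PySem.Set.add seen s)

-- A's index loop over range(len(linear)-1) is the structural pairwise fold
theorem pvRangeFold_eq_links (lin : List String) (d : PySem.Dict String String) :
    (PySem.List.pyRange 0 ((lin.length : Int) - 1) 1).foldl
        (fun d i => d.insert (PySem.List.pyGetD lin i "") (PySem.List.pyGetD lin (i + 1) "")) d
      = pvLinks d lin := by
  induction lin generalizing d with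
  | nil => simp [pvLinks, PySem.List.pyRange_one_eq_nil]
  | cons a tail ih =>
    cases tail with
    | nil =>
      simp [pvLinks, PySem.List.pyRange_one_eq_nil]
    | cons b t =>
      have hlen : ((a :: b :: t).length : Int) - 1 = ((b :: t).length : Int) := by
        push_cast [List.length_cons]; ring
      rw [hlen]
      have hcons : PySem.List.pyRange 0 ((b :: t).length : Int) 1
          = 0 :: PySem.List.pyRange 1 ((b :: t).length : Int) 1 :=
        PySem.List.pyRange_one_cons (by exact_mod_cast Nat.succ_pos t.length)
      rw [hcons, List.foldl_cons]
      have h0 : PySem.List.pyGetD (a :: b :: t) 0 "" = a := PySem.List.pyGetD_zero_cons _ _ _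
      have h1 : PySem.List.pyGetD (a :: b :: t) (0 + 1) "" = b := by
        have := PySem.List.pyGetD_natCast (a :: b :: t) 1 ""
        simpa using this
      rw [h0, h1]
      -- reindex: fold over range 1..n+1 on (a :: l) = fold over range 0..n on l
      have hshift : PySem.List.pyRange 1 ((b :: t).length : Int) 1
          = (PySem.List.pyRange 0 (((b :: t).length : Int) - 1) 1).map (fun i => i + 1) := by
        rw [PySem.List.pyRange_one, PySem.List.pyRange_one, List.map_map]
        simp only [Int.sub_zero]
        apply List.map_congr_left
        intro k _
        simp only [Function.comp_apply]
        ring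
      rw [hshift, List.foldl_map]
      have hfun : ∀ (d' : PySem.Dict String String) (i : Int),
          i ∈ PySem.List.pyRange 0 (((b :: t).length : Int) - 1) 1 →
          d'.insert (PySem.List.pyGetD (a :: b :: t) (i + 1) "")
              (PySem.List.pyGetD (a :: b :: t) (i + 1 + 1) "")
            = d'.insert (PySem.List.pyGetD (b :: t) i "") (PySem.List.pyGetD (b :: t) (i + 1) "") := by
        intro d' i hi
        have hge : 0 ≤ i := (PySem.List.mem_pyRange_one.mp hi).1
        obtain ⟨n, rfl⟩ := Int.eq_ofNat_of_zero_le hge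
        have e1 : PySem.List.pyGetD (a :: b :: t) ((n : Int) + 1) "" = PySem.List.pyGetD (b :: t) (n : Int) "" := by
          have h' : ((n : Int) + 1) = ((n + 1 : Nat) : Int) := by push_cast; ring
          rw [h', PySem.List.pyGetD_natCast, PySem.List.pyGetD_natCast]
          rfl
        have e2 : PySem.List.pyGetD (a :: b :: t) ((n : Int) + 1 + 1) "" = PySem.List.pyGetD (b :: t) ((n : Int) + 1) "" := by
          have h' : ((n : Int) + 1 + 1) = ((n + 2 : Nat) : Int) := by push_cast; ring
          have h'' : ((n : Int) + 1) = ((n + 1 : Nat) : Int) := by push_cast; ring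
          rw [h', h'', PySem.List.pyGetD_natCast, PySem.List.pyGetD_natCast]
          rfl
        rw [e1, e2]
      rw [PySem.List.foldl_congr_mem _ _ _ _ hfun]
      exact ih (d.insert a b)

-- ===== VERDICT (by name: the statement is the Claim_ definition above) =====
theorem build_scene_order_spec : Claim_equal_build_scene_order := by
  intro rows _
  unfold Spec_build_scene_order build_scene_order build_scene_order_alt
  rw [show (fun (st : List String × PySem.Set String) (row : List String) =>
        row.foldl (fun st scene =>
          if PySem.Set.contains st.2 scene then st
          else (st.1 ++ [scene], PySem.Set.add st.2 scene)) st)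
      = (fun st row => row.foldl pvStepA st) from rfl]
  rw [show (fun (st : PySem.Dict String String × Option String × Option String × PySem.Set String)
        (row : List String) =>
        row.foldl (fun st scene =>
          if PySem.Set.contains st.2.2.2 scene then st
          else
            ((match st.2.2.1 with
              | none => st.1
              | some p => st.1.insert p scene),
             (match st.2.2.1 with
              | none => some scene
              | some _ => st.2.1),
             some scene,
             PySem.Set.add st.2.2.2 scene)) st)
      = (fun st row => row.foldl pvStepB st) from rfl]
  rw [← List.foldl_flatten, ← List.foldl_flatten]
  have hsim := pvSim rows.flatten [] (PySem.Set.add PySem.Set.empty "vestibule")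
      (PySem.Dict.empty.insert "introduction" "vestibule")
  simp only [pvLinks, List.head?_nil, List.getLast?_nil] at hsim
  rw [hsim]
  dsimp only
  rw [pvRangeFold_eq_links]
  generalize (rows.flatten.foldl pvStepA ([], PySem.Set.add PySem.Set.empty "vestibule")).1 = lin
  cases lin with
  | nil => simp [pvLinks]
  | cons a t =>
    have hne : a :: t ≠ [] := by simp
    rw [if_neg hne, if_neg hne, PySem.List.pyGetD_neg_one (a :: t) "" hne,
        List.getLast?_eq_some_getLast hne, PySem.List.pyGetD_zero_cons]
    simp
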